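-- pv_equiv track=rewrite | github.com/maxim8532/max-calculator | invalid_number_format_exception.py | _highlight_problems
-- ===== SOURCE A (Python) =====
-- def _highlight_problems(expression, problematic_indexes):
--     """
--     Highlights problematic characters in the expression.
--
--     :param expression: The original expression.
--     :param problematic_indexes: List of indexes where the issues occurred.
--     :return: A string with problematic characters highlighted in red.
--     """
--     highlighted = ""
--     for i, char in enumerate(expression):
--         if i in problematic_indexes:
--             highlighted += f"\033[91m{char}\033[0m"  # Highlight in red
--         else:
--             highlighted += char
--     return highlighted
-- ===== SOURCE B (Python) =====
-- def _highlight_problems(expression, problematic_indexes):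
--     """Slice-based rebuild: walk the sorted valid highlight positions and copy
--     untouched runs between them, instead of testing membership per character."""
--     n = len(expression)
--     positions = sorted({i for i in problematic_indexes if 0 <= i < n})
--     parts = []
--     last = 0
--     for pos in positions:
--         parts.append(expression[last:pos])
--         parts.append("\033[91m" + expression[pos:pos + 1] + "\033[0m")
--         last = pos + 1
--     parts.append(expression[last:])
--     return "".join(parts)
-- ===== Notes on version B (the rewrite author's own statement) =====
-- stated objective: faster
-- what changed: Instead of scanning every character and testing its index against the list, B filters/dedups/sorts the valid positions once and rebuilds the string from whole slices between consecutive positions, joined at the end.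
import Mathlib
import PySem

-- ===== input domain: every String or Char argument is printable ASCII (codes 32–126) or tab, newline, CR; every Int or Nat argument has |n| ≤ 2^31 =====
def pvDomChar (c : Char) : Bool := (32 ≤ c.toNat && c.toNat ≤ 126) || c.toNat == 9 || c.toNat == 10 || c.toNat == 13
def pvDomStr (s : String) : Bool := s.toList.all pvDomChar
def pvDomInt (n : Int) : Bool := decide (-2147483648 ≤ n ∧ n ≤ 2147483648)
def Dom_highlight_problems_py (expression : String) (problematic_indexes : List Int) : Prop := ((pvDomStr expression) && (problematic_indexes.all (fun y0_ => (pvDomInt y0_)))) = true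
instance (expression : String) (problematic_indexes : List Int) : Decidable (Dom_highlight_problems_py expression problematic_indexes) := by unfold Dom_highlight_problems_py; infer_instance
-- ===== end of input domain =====

-- B rebuilds the string from whole slices between the sorted valid highlight
-- positions instead of testing membership for every character (objective: faster).

-- ===== PORT A =====
def highlight_problems_py (expression : String) (problematic_indexes : List Int) : String :=
  String.ofList ((PySem.List.enumerate expression.toList 0).foldl
    (fun highlighted ic =>
      if ic.1 ∈ problematic_indexes then
        highlighted ++ ("\x1b[91m".toList ++ [ic.2] ++ "\x1b[0m".toList)
      else
        highlighted ++ [ic.2]) [])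

-- ===== PORT B =====
-- B-side helper: one iteration of B's loop (append the untouched run and the wrapped char).
def pvStep (cs : List Char) (st : List (List Char) × Int) (pos : Int) : List (List Char) × Int :=
  (st.1 ++ [PySem.List.slice cs (some st.2) (some pos),
            "\x1b[91m".toList ++ PySem.List.slice cs (some pos) (some (pos + 1)) ++ "\x1b[0m".toList],
   pos + 1)

def highlight_problems_py_alt (expression : String) (problematic_indexes : List Int) : String :=
  let cs := expression.toList
  let n : Int := (cs.length : Int)
  let positions : List Int :=
    PySem.List.sorted
      (PySem.Set.ofList (problematic_indexes.filter (fun i => decide (0 ≤ i ∧ i < n))))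
      (fun x => x) false
  let st : List (List Char) × Int := positions.foldl (pvStep cs) ([], 0)
  String.ofList ((st.1 ++ [PySem.List.slice cs (some st.2) none]).flatten)

-- ===== PRECONDITION & SPEC =====
def Spec_highlight_problems_py (expression : String) (problematic_indexes : List Int) (out : String) : Prop := out = highlight_problems_py_alt expression problematic_indexes
instance (expression : String) (problematic_indexes : List Int) (out : String) : Decidable (Spec_highlight_problems_py expression problematic_indexes out) := by unfold Spec_highlight_problems_py; infer_instance

-- ===== CLAIM (what is proved, stated in full; the proofs are below) =====
def Claim_equal_highlight_problems_py : Prop := ∀ (expression : String) (problematic_indexes : List Int), Dom_highlight_problems_py expression problematic_indexes → Spec_highlight_problems_py expression problematic_indexes (highlight_problems_py expression problematic_indexes)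

-- ===== LEMMAS AND PROOFS =====

/-- What A appends for an indexed character. -/
def pvWrap (S : List Int) (ic : Int × Char) : List Char :=
  if ic.1 ∈ S then "\x1b[91m".toList ++ [ic.2] ++ "\x1b[0m".toList else [ic.2]

/-- What B's loop produces from position list `ps` with cursor `last` onwards. -/
def pvRest (cs : List Char) : List Int → Int → List Char
  | [], last => PySem.List.slice cs (some last) none
  | p :: ps, last =>
      PySem.List.slice cs (some last) (some p) ++
      ("\x1b[91m".toList ++ PySem.List.slice cs (some p) (some (p + 1)) ++ "\x1b[0m".toList) ++
      pvRest cs ps (p + 1)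

lemma pvA_eq_flatMap (e : String) (S : List Int) :
    highlight_problems_py e S =
      String.ofList ((PySem.List.enumerate e.toList 0).flatMap (pvWrap S)) := by
  unfold highlight_problems_py
  congr 1
  have h : (fun (highlighted : List Char) (ic : Int × Char) =>
      if ic.1 ∈ S then
        highlighted ++ ("\x1b[91m".toList ++ [ic.2] ++ "\x1b[0m".toList)
      else highlighted ++ [ic.2])
      = fun (acc : List Char) (ic : Int × Char) => acc ++ pvWrap S ic := by
    funext acc ic
    unfold pvWrap
    split_ifs <;> simp
  rw [h, PySem.List.foldl_append_eq_flatMap]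
  simp

lemma pvB_fold (cs : List Char) (ps : List Int) :
    ∀ (acc : List (List Char)) (last : Int),
      ((ps.foldl (pvStep cs) (acc, last)).1 ++
        [PySem.List.slice cs (some (ps.foldl (pvStep cs) (acc, last)).2) none]).flatten
      = acc.flatten ++ pvRest cs ps last := by
  induction ps with
  | nil => intro acc last; simp [pvRest]
  | cons p ps ih =>
      intro acc last
      simp only [List.foldl_cons]
      rw [show pvStep cs (acc, last) p = (acc ++ [PySem.List.slice cs (some last) (some p),
            "\x1b[91m".toList ++ PySem.List.slice cs (some p) (some (p + 1)) ++ "\x1b[0m".toList],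
          p + 1) from rfl]
      rw [ih]
      simp [pvRest]

lemma pvFlatMap_id (S : List Int) :
    ∀ (l : List Char) (s : Int),
      (∀ i : Int, s ≤ i → i < s + l.length → i ∉ S) →
      (PySem.List.enumerate l s).flatMap (pvWrap S) = l := by
  intro l
  induction l with
  | nil => intro s _; simp [PySem.List.enumerate_nil]
  | cons c l ih =>
      intro s h
      rw [PySem.List.enumerate_cons]
      simp only [List.flatMap_cons]
      have hs : s ∉ S := h s le_rfl (by simp only [List.length_cons]; push_cast; omega)
      rw [pvWrap, if_neg hs,
        ih (s + 1) (fun i h1 h2 => h i (by omega)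
          (by simp only [List.length_cons] at h2 ⊢; push_cast at h2 ⊢; omega))]
      simp

lemma pvMain (cs : List Char) (S : List Int) :
    ∀ (ps : List Int) (last : Int), 0 ≤ last →
      (∀ p ∈ ps, last ≤ p ∧ p < (cs.length : Int)) →
      ps.Pairwise (· < ·) →
      (∀ i : Int, last ≤ i → i < (cs.length : Int) → (i ∈ ps ↔ i ∈ S)) →
      pvRest cs ps last = (PySem.List.enumerate (cs.drop last.toNat) last).flatMap (pvWrap S) := by
  intro ps
  induction ps with
  | nil =>
      intro last h0 _ _ hmem
      rw [pvRest, PySem.List.slice_from _ h0]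
      refine (pvFlatMap_id S _ last ?_).symm
      intro i h1 h2 hiS
      simp only [List.length_drop] at h2
      have hmm := (hmem i h1 (by omega)).2 hiS
      simp at hmm
  | cons p ps ih =>
      intro last h0 hrange hpw hmem
      have hp := hrange p (by simp)
      have h0p : (0 : Int) ≤ p := le_trans h0 hp.1
      have hP : p.toNat < cs.length := by omega
      rw [List.pairwise_cons] at hpw
      rw [pvRest, PySem.List.slice_toNat cs h0 h0p, PySem.List.slice_toNat cs h0p (by omega)]
      have hdropsplit : cs.drop last.toNat
          = (cs.drop last.toNat).take (p.toNat - last.toNat) ++ (cs[p.toNat] :: cs.drop (p.toNat + 1)) := by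
        conv_lhs => rw [← List.take_append_drop (p.toNat - last.toNat) (cs.drop last.toNat)]
        rw [List.drop_drop]
        congr 1
        rw [show last.toNat + (p.toNat - last.toNat) = p.toNat from by omega]
        exact List.drop_eq_getElem_cons hP
      have hlen : ((cs.drop last.toNat).take (p.toNat - last.toNat)).length = p.toNat - last.toNat := by
        simp only [List.length_take, List.length_drop]; omega
      conv_rhs => rw [hdropsplit, PySem.List.enumerate_append, hlen,
        show last + ((p.toNat - last.toNat : Nat) : Int) = p from by omega,
        PySem.List.enumerate_cons]
      simp only [List.flatMap_append, List.flatMap_cons]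
      have h1 : (PySem.List.enumerate ((cs.drop last.toNat).take (p.toNat - last.toNat)) last).flatMap (pvWrap S)
          = (cs.drop last.toNat).take (p.toNat - last.toNat) := by
        refine pvFlatMap_id S _ last ?_
        intro i hi1 hi2 hiS
        rw [hlen] at hi2
        have hip : i < p := by omega
        have := (hmem i hi1 (by omega)).2 hiS
        rcases List.mem_cons.mp this with h | h
        · omega
        · exact absurd (hpw.1 i h) (by omega)
      have h2 : pvWrap S (p, cs[p.toNat]) = "\x1b[91m".toList ++ [cs[p.toNat]] ++ "\x1b[0m".toList := by
        rw [pvWrap, if_pos]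
        exact (hmem p hp.1 hp.2).1 (by simp)
      have h3 : (cs.drop p.toNat).take ((p + 1).toNat - p.toNat) = [cs[p.toNat]] := by
        rw [show (p + 1).toNat - p.toNat = 1 from by omega, List.drop_eq_getElem_cons hP]
        rfl
      have h4 : pvRest cs ps (p + 1)
          = (PySem.List.enumerate (cs.drop (p + 1).toNat) (p + 1)).flatMap (pvWrap S) := by
        refine ih (p + 1) (by omega) ?_ hpw.2 ?_
        · intro q hq
          exact ⟨by have := hpw.1 q hq; omega, (hrange q (by simp [hq])).2⟩
        · intro i hi1 hi2
          rw [← hmem i (by omega) hi2]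
          simp only [List.mem_cons]
          constructor
          · exact fun h => Or.inr h
          · rintro (h | h)
            · omega
            · exact h
      rw [h1, h2, h3, h4, show (p + 1).toNat = p.toNat + 1 from by omega]
      simp [List.append_assoc]

-- ===== VERDICT (by name: the statement is the Claim_ definition above) =====
theorem highlight_problems_py_spec : Claim_equal_highlight_problems_py := by
  intro e S _
  unfold Spec_highlight_problems_py highlight_problems_py_alt
  simp only []
  rw [pvA_eq_flatMap, pvB_fold]
  congr 1
  rw [List.flatten_nil, List.nil_append]
  have hpos : ∀ i : Int,
      i ∈ PySem.List.sorted
        (PySem.Set.ofList (S.filter (fun i => decide (0 ≤ i ∧ i < (e.toList.length : Int)))))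
        (fun x => x) false
      ↔ i ∈ S ∧ (0 ≤ i ∧ i < (e.toList.length : Int)) := by
    intro i
    rw [PySem.List.mem_sorted, PySem.Set.mem_ofList, List.mem_filter, decide_eq_true_iff]
  rw [pvMain e.toList S _ 0 le_rfl
    (fun p hp => ⟨((hpos p).1 hp).2.1, ((hpos p).1 hp).2.2⟩)
    (PySem.List.sorted_ofList_pairwise_lt _)
    (fun i h1 h2 => by rw [hpos i]; tauto)]
  simp
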